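-- pv_equiv track=rewrite | github.com/docxology/MetaInformAnt | src/metainformant/math/coalescent.py | site_frequency_spectrum_counts
-- ===== SOURCE A (Python) =====
-- from collections.abc import Iterable
--
-- def site_frequency_spectrum_counts(derived_counts: Iterable[int], sample_size: int) -> list[int]:
--     """Count sites by derived allele frequency to construct site frequency spectrum.
--
--     Converts a list of derived allele counts (how many derived alleles at each site)
--     into the site frequency spectrum, which counts how many sites have i derived
--     alleles for each i = 1, 2, ..., n-1.
--
--     Args:
--         derived_counts: Iterable of derived allele counts, one per polymorphic site
--             (e.g., [1, 2, 1, 3, 1] means 5 sites with 1, 2, 1, 3, 1 derived alleles)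
--         sample_size: Number of sampled sequences (n). Derived counts must be in [1, n-1]
--             for polymorphic sites.
--
--     Returns:
--         List of length (n//2) where the i-th element (0-indexed) is the count of sites
--         with minor allele frequency (i+1). Only counts minor allele frequencies (frequencies
--         up to n/2), as frequencies > n/2 are symmetric to frequencies < n/2.
--
--         For example, with n=5:
--         - Sites with 1 or 4 derived alleles both map to minor frequency 1
--         - Sites with 2 or 3 derived alleles both map to minor frequency 2
--
--     Note:
--         This function only counts minor allele frequencies (frequencies ≤ n/2).
--         Major allele frequencies (frequencies > n/2) are folded into the minor
--         frequency counts. This is standard practice in SFS analysis to avoid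
--         ambiguity about which allele is ancestral.
--
--     Examples:
--         >>> counts = site_frequency_spectrum_counts([1, 1, 2, 2, 3], sample_size=5)
--         >>> counts[0]  # Sites with minor allele frequency 1 (1 or 4 derived alleles)
--         2
--         >>> counts[1]  # Sites with minor allele frequency 2 (2 or 3 derived alleles)
--         3
--     """
--     n = int(sample_size)
--     if n < 2:
--         return []
--     half = n // 2
--     sfs = [0] * half
--     for c in derived_counts:
--         k = int(c)
--         if 0 < k < n:  # polymorphic
--             minor = min(k, n - k)
--             if 1 <= minor <= half:
--                 sfs[minor - 1] += 1
--     return sfs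
-- ===== SOURCE B (Python) =====
-- def site_frequency_spectrum_counts(derived_counts, sample_size):
--     n = int(sample_size)
--     if n < 2:
--         return []
--     counts = [int(c) for c in derived_counts]
--     return [counts.count(i) + (counts.count(n - i) if n - i != i else 0)
--             for i in range(1, n // 2 + 1)]
-- ===== Notes on version B (the rewrite author's own statement) =====
-- stated objective: simpler
-- what changed: B maintains no spectrum array at all: instead of scattering each element into a mutable histogram indexed by min(k, n-k), it counts each minor-frequency bin directly, computing list.count(i) + list.count(n-i) per bin i.
import Mathlib
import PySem

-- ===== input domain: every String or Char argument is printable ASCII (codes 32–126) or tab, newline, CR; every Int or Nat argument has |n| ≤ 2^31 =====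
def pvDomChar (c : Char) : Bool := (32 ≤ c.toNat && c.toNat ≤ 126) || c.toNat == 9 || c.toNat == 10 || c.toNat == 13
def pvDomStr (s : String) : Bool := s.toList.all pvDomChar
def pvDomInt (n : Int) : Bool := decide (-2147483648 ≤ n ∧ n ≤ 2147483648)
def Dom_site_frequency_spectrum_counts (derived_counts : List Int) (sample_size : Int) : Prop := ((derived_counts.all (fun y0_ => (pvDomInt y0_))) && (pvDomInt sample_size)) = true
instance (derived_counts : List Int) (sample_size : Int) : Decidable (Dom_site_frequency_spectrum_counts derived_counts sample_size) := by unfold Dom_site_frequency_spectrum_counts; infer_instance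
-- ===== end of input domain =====

-- B keeps no spectrum array: it counts each minor-frequency bin directly (elements equal
-- to i or n-i) instead of scattering elements into a mutable folded histogram; simpler, not faster.


-- ===== PORT A =====
-- loop body of A, named so the lemmas below can speak about the fold
def sfcStepA (n half : Int) (sfs : List Int) (c : Int) : List Int :=
  let k := c
  if 0 < k ∧ k < n then
    let minor := min k (n - k)
    if 1 ≤ minor ∧ minor ≤ half then
      PySem.List.pySetD sfs (minor - 1) (PySem.List.pyGetD sfs (minor - 1) 0 + 1)
    else sfs
  else sfs

def site_frequency_spectrum_counts (derived_counts : List Int) (sample_size : Int) : List Int :=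
  let n := sample_size
  if n < 2 then []
  else
    let half := PySem.Int.floordiv n 2
    derived_counts.foldl (sfcStepA n half) (List.replicate half.toNat (0 : Int))

-- ===== PORT B =====
def site_frequency_spectrum_counts_alt (derived_counts : List Int) (sample_size : Int) : List Int :=
  let n := sample_size
  if n < 2 then []
  else
    let counts := derived_counts.map (fun c => c)   -- counts = [int(c) for c in derived_counts]
    (PySem.List.pyRange 1 (PySem.Int.floordiv n 2 + 1) 1).map (fun i =>
      -- counts.count(i) + (counts.count(n - i) if n - i != i else 0)
      (PySem.List.count counts i : Int) +
        (if n - i ≠ i then (PySem.List.count counts (n - i) : Int) else 0))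

-- ===== PRECONDITION & SPEC =====
def Spec_site_frequency_spectrum_counts (derived_counts : List Int) (sample_size : Int) (out : List Int) : Prop := out = site_frequency_spectrum_counts_alt derived_counts sample_size
instance (derived_counts : List Int) (sample_size : Int) (out : List Int) : Decidable (Spec_site_frequency_spectrum_counts derived_counts sample_size out) := by unfold Spec_site_frequency_spectrum_counts; infer_instance

-- ===== CLAIM (what is proved, stated in full; the proofs are below) =====
def Claim_equal_site_frequency_spectrum_counts : Prop := ∀ (derived_counts : List Int) (sample_size : Int), Dom_site_frequency_spectrum_counts derived_counts sample_size → Spec_site_frequency_spectrum_counts derived_counts sample_size (site_frequency_spectrum_counts derived_counts sample_size)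

-- ===== LEMMAS AND PROOFS =====

-- reading any index of a zero-filled list gives zero
theorem getD_rep0 (m j : Nat) : (List.replicate m (0 : Int)).getD j 0 = 0 := by
  by_cases hj : j < m
  · rw [List.getD_eq_getElem _ _ (by simpa), List.getElem_replicate]
  · rw [List.getD_eq_default _ _ (by simpa using Nat.le_of_not_lt hj)]

-- setting index i then reading index j, with i in range
theorem getD_set_ite (s : List Int) (i j : Nat) (v : Int) (hi : i < s.length) :
    (s.set i v).getD j 0 = if i = j then v else s.getD j 0 := by
  by_cases hj : j < s.length
  · rw [List.getD_eq_getElem _ _ (by simpa), List.getD_eq_getElem _ _ hj]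
    rw [List.getElem_set]
  · have hlej : s.length ≤ j := Nat.le_of_not_lt hj
    rw [List.getD_eq_default _ _ (by simpa using hlej), List.getD_eq_default _ _ hlej,
        if_neg (by omega)]

-- A's fold preserves the length and entry j counts elements with minor frequency j+1
theorem sfcA_char (n : Int) (hn : 2 ≤ n) (xs : List Int) :
    ∀ (s : List Int), s.length = (n / 2).toNat →
      (xs.foldl (sfcStepA n (PySem.Int.floordiv n 2)) s).length = s.length ∧
      ∀ j : Nat, (xs.foldl (sfcStepA n (PySem.Int.floordiv n 2)) s).getD j 0 =
        s.getD j 0 + (xs.countP (fun c => decide (0 < c ∧ c < n ∧ min c (n - c) = (j : Int) + 1)) : Int) := by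
  have hfd : PySem.Int.floordiv n 2 = n / 2 := PySem.Int.floordiv_eq_ediv_of_pos (by omega)
  induction xs with
  | nil => intro s hs; simp
  | cons c xs ih =>
    intro s hs
    by_cases h1 : 0 < c ∧ c < n
    · have hm1 : 1 ≤ min c (n - c) := by omega
      have hm2 : min c (n - c) ≤ n / 2 := by omega
      have hstep : sfcStepA n (PySem.Int.floordiv n 2) s c =
          s.set (min c (n - c) - 1).toNat (s.getD (min c (n - c) - 1).toNat 0 + 1) := by
        simp only [sfcStepA, hfd, h1, and_self, if_true]
        rw [if_pos ⟨hm1, hm2⟩, PySem.List.pySetD_of_nonneg _ _ (by omega),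
            PySem.List.pyGetD_eq_getElem _ _ (by omega) (by rw [hs]; omega)]
        congr 1
        rw [List.getD_eq_getElem _ _ (by rw [hs]; omega)]
      have hidx : (min c (n - c) - 1).toNat < s.length := by rw [hs]; omega
      have hlen' : (s.set (min c (n - c) - 1).toNat (s.getD (min c (n - c) - 1).toNat 0 + 1)).length = (n / 2).toNat := by
        simp [hs]
      obtain ⟨hl, hg⟩ := ih _ hlen'
      refine ⟨?_, ?_⟩
      · rw [List.foldl_cons, hstep, hl, List.length_set]
      · intro j
        simp only [List.foldl_cons, hstep, hg, List.countP_cons]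
        rw [getD_set_ite _ _ _ _ hidx]
        by_cases hj : (min c (n - c) - 1).toNat = j
        · have hp : (decide (0 < c ∧ c < n ∧ min c (n - c) = (j : Int) + 1)) = true := by
            simp only [decide_eq_true_eq]; omega
          rw [if_pos hj, hj]
          simp only [hp, if_true]
          push_cast
          ring
        · have hp : (decide (0 < c ∧ c < n ∧ min c (n - c) = (j : Int) + 1)) = false := by
            simp only [decide_eq_false_iff_not]; omega
          rw [if_neg hj]
          simp only [hp]
          push_cast
          ring
    · have hstep : sfcStepA n (PySem.Int.floordiv n 2) s c = s := by
        simp [sfcStepA, h1]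
      obtain ⟨hl, hg⟩ := ih s hs
      refine ⟨?_, ?_⟩
      · rw [List.foldl_cons, hstep, hl]
      · intro j
        have hp : (decide (0 < c ∧ c < n ∧ min c (n - c) = (j : Int) + 1)) = false := by
          simp only [decide_eq_false_iff_not]; tauto
        simp only [List.foldl_cons, hstep, hg, List.countP_cons, hp]
        push_cast
        ring

-- a count of a single value as a countP, so both sides live in countP form
theorem count_eq_countP_int (xs : List Int) (v : Int) :
    (xs.count v : Int) = (xs.countP (fun k => decide (k = v)) : Int) := by
  rw [List.count_eq_countP]
  norm_cast

-- a count splits as the sum of two counts when it does so element-wise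
theorem countP_int_add (p q r : Int → Bool)
    (h : ∀ c : Int, (if p c then (1 : Int) else 0) = (if q c then 1 else 0) + (if r c then 1 else 0))
    (xs : List Int) : (xs.countP p : Int) = xs.countP q + xs.countP r := by
  induction xs with
  | nil => simp
  | cons c xs ih =>
    simp only [List.countP_cons]
    push_cast
    have := h c
    split_ifs at this ⊢ <;> omega

-- the two programs agree on every input (the Dom hypothesis is not needed)
theorem site_frequency_spectrum_counts_agree :
    ∀ (derived_counts : List Int) (sample_size : Int),
      site_frequency_spectrum_counts derived_counts sample_size =
      site_frequency_spectrum_counts_alt derived_counts sample_size := by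
  intro xs n
  by_cases hn : n < 2
  · simp [site_frequency_spectrum_counts, site_frequency_spectrum_counts_alt, hn]
  · have hn2 : 2 ≤ n := by omega
    have hfd : PySem.Int.floordiv n 2 = n / 2 := PySem.Int.floordiv_eq_ediv_of_pos (by omega)
    simp only [site_frequency_spectrum_counts, site_frequency_spectrum_counts_alt, hn, if_false,
      List.map_id_fun', id]
    obtain ⟨hAl, hAg⟩ := sfcA_char n hn2 xs (List.replicate (PySem.Int.floordiv n 2).toNat 0)
      (by rw [hfd]; simp)
    rw [PySem.List.pyRange_one]
    have hhalf : ((PySem.Int.floordiv n 2 + 1) - 1).toNat = (n / 2).toNat := by rw [hfd]; omega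
    rw [hhalf]
    apply List.ext_getElem
    · simp only [List.length_map, List.length_range]
      rw [hAl]
      simp
    · intro j hj1 hj2
      simp only [List.length_map, List.length_range] at hj2
      have hjn : (j : Int) + 1 ≤ n / 2 := by omega
      rw [← List.getD_eq_getElem _ 0 hj1]
      rw [hAg j]
      simp only [List.getElem_map, List.getElem_range]
      simp only [getD_rep0, PySem.List.count_eq]
      by_cases hmid : n - (1 + (j : Int)) ≠ 1 + (j : Int)
      · rw [if_pos hmid, count_eq_countP_int, count_eq_countP_int]
        have hsplit := countP_int_add
          (fun c => decide (0 < c ∧ c < n ∧ min c (n - c) = (j : Int) + 1))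
          (fun k => decide (k = 1 + (j : Int)))
          (fun k => decide (k = n - (1 + (j : Int))))
          (by
            intro c
            split_ifs with h1 h2 h3 h2 h3 <;> simp only [decide_eq_true_eq] at * <;> omega) xs
        push_cast at hsplit ⊢
        omega
      · rw [if_neg hmid, count_eq_countP_int]
        have hcong : List.countP (fun c => decide (0 < c ∧ c < n ∧ min c (n - c) = (j : Int) + 1)) xs =
            List.countP (fun k => decide (k = 1 + (j : Int))) xs := by
          apply List.countP_congr
          intro c _
          simp only [decide_eq_true_eq]
          omega
        rw [hcong]
        ring

-- ===== VERDICT (by name: the statement is the Claim_ definition above) =====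
theorem site_frequency_spectrum_counts_spec : Claim_equal_site_frequency_spectrum_counts := by
  intro xs n _
  exact site_frequency_spectrum_counts_agree xs n
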